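-- pv_equiv track=rewrite | github.com/Adam-Jimenez/binarysearch-editorials | Swap Consecutive Pair of Even Numbers.py | solve
-- ===== SOURCE A (Python) =====
-- def solve(nums):
--     j,flip=0,False
--     for i in range(len(nums)):
--         if not nums[i]&1:
--             if flip: nums[i],nums[j]=nums[j],nums[i]
--             j=i
--             flip^=True
--     return nums
-- ===== SOURCE B (Python) =====
-- def solve(nums):
--     evens = [i for i in range(len(nums)) if nums[i] % 2 == 0]
--     it = iter(evens)
--     for a, b in zip(it, it):
--         nums[a], nums[b] = nums[b], nums[a]
--     return nums
-- ===== Notes on version B (the rewrite author's own statement) =====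
-- stated objective: alternative
-- what changed: Replaces A's single-pass toggle/last-even-index state machine with a two-phase approach: first collect the indices of even elements, then swap them pairwise in place via zip over one iterator.
import Mathlib
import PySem

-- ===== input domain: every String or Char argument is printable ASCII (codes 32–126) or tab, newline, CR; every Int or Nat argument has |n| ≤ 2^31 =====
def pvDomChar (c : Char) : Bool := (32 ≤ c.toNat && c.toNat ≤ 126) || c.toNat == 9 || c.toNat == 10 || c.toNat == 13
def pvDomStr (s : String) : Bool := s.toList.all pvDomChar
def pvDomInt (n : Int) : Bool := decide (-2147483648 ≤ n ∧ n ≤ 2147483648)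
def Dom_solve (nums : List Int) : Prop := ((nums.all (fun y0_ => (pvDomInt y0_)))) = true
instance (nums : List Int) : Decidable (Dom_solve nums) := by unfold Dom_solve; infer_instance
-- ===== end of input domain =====

-- B swaps the same consecutive even pairs via an index table instead of A's toggle state machine;
-- objective: alternative decomposition, same O(n) cost.  Both Pythons mutate nums in place and
-- return it; the equivalence proved here is about the returned list value (B performs the same
-- in-place swaps as A).

-- ===== PORT A =====
-- range(len(nums)) yields exactly the in-range nonnegative indices, so the loop variable is a Nat
-- and nums[i] is List.getD xs i 0 (exact: i < length).  `not nums[i]&1` tests evenness; Python's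
-- `x & 1` equals Lean's `x % 2` (Int.emod) for every int (both yield 0 or 1), so the test is
-- ported as `% 2 == 0` (exact).  The simultaneous assignment nums[i],nums[j]=nums[j],nums[i]
-- reads both old values and then writes i, then j.
def solve (nums : List Int) : List Int :=
  ((List.range nums.length).foldl
    (fun (st : List Int × Nat × Bool) (i : Nat) =>
      let xs := st.1
      let j := st.2.1
      let flip := st.2.2
      if xs.getD i 0 % 2 == 0 then
        let xs' := if flip then (xs.set i (xs.getD j 0)).set j (xs.getD i 0) else xs
        (xs', i, !flip)
      else st)
    (nums, 0, false)).1

-- ===== PORT B =====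
-- the simultaneous assignment nums[a],nums[b]=nums[b],nums[a]: write a, then b
def pvSwap (xs : List Int) (a b : Nat) : List Int :=
  (xs.set a (xs.getD b 0)).set b (xs.getD a 0)

-- `for a, b in zip(it, it)` over the iterator consumes evens two at a time; a trailing
-- unpaired element is dropped — exactly this structural recursion.
def pairFold (xs : List Int) : List Nat → List Int
  | a :: b :: rest => pairFold (pvSwap xs a b) rest
  | _ => xs

-- `[i for i in range(len(nums)) if nums[i] % 2 == 0]` (indices in range, so getD is exact)
def solve_alt (nums : List Int) : List Int :=
  pairFold nums ((List.range nums.length).filter (fun i => nums.getD i 0 % 2 == 0))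

-- ===== PRECONDITION & SPEC =====
def Spec_solve (nums : List Int) (out : List Int) : Prop := out = solve_alt nums
instance (nums : List Int) (out : List Int) : Decidable (Spec_solve nums out) := by unfold Spec_solve; infer_instance

-- ===== CLAIM (what is proved, stated in full; the proofs are below) =====
def Claim_equal_solve : Prop := ∀ (nums : List Int), Dom_solve nums → Spec_solve nums (solve nums)

-- ===== LEMMAS AND PROOFS =====

-- swapping two positions whose values are both even preserves the parity at every position
lemma getD_pvSwap_parity (xs : List Int) (a b : Nat)
    (ha : xs.getD a 0 % 2 = 0) (hb : xs.getD b 0 % 2 = 0) (i : Nat) :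
    (pvSwap xs a b).getD i 0 % 2 = xs.getD i 0 % 2 := by
  unfold pvSwap
  simp only [List.getD_eq_getElem?_getD] at ha hb ⊢
  simp only [List.getElem?_set, List.length_set]
  by_cases hbi : b = i
  · subst hbi
    rw [if_pos rfl]
    by_cases hl : b < xs.length
    · rw [if_pos hl]; simp only [Option.getD_some]
      rw [ha, hb]
    · rw [if_neg hl]
      have : xs[b]? = none := List.getElem?_eq_none (by omega)
      rw [this]
  · rw [if_neg hbi]
    by_cases hai : a = i
    · subst hai
      rw [if_pos rfl]
      by_cases hl : a < xs.length
      · rw [if_pos hl]; simp only [Option.getD_some]; rw [ha, hb]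
      · rw [if_neg hl]
        have : xs[a]? = none := List.getElem?_eq_none (by omega)
        rw [this]
    · rw [if_neg hai]

lemma pvSwap_comm (xs : List Int) (a b : Nat) (h : a ≠ b) :
    pvSwap xs a b = pvSwap xs b a := by
  unfold pvSwap
  exact List.set_comm _ _ h

-- A's loop body, named for the lemmas
def stepA (st : List Int × Nat × Bool) (i : Nat) : List Int × Nat × Bool :=
  let xs := st.1
  let j := st.2.1
  let flip := st.2.2
  if xs.getD i 0 % 2 == 0 then
    let xs' := if flip then (xs.set i (xs.getD j 0)).set j (xs.getD i 0) else xs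
    (xs', i, !flip)
  else st

lemma solve_eq_stepA (nums : List Int) :
    solve nums = ((List.range nums.length).foldl stepA (nums, 0, false)).1 := rfl

-- the heart: A's state machine over range' m k equals pairFold on the pending even index
-- (if flip) followed by the even indices ≥ m
lemma loopA_inv : ∀ (k m : Nat) (xs : List Int) (j : Nat) (flip : Bool),
    (flip = true → j < m ∧ xs.getD j 0 % 2 = 0) →
    ((List.range' m k).foldl stepA (xs, j, flip)).1
      = pairFold xs ((if flip then [j] else []) ++
          (List.range' m k).filter (fun i => xs.getD i 0 % 2 == 0)) := by
  intro k
  induction k with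
  | zero =>
      intro m xs j flip _
      cases flip <;> simp [pairFold]
  | succ k ih =>
      intro m xs j flip hinv
      rw [List.range'_succ, List.foldl_cons, List.filter_cons]
      by_cases he : xs.getD m 0 % 2 = 0
      · have heb : (xs.getD m 0 % 2 == 0) = true := by simpa using he
        rw [heb, if_pos rfl]
        cases flip with
        | false =>
            have hstep : stepA (xs, j, false) m = (xs, m, true) := by
              unfold stepA; dsimp only; rw [heb]; simp
            rw [hstep, ih (m+1) xs m true (fun _ => ⟨Nat.lt_succ_self m, he⟩)]
            simp
        | true =>
            obtain ⟨hjm, hje⟩ := hinv rfl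
            have hswap : (xs.set m (xs.getD j 0)).set j (xs.getD m 0) = pvSwap xs j m := by
              rw [pvSwap_comm xs j m (by omega)]; rfl
            have hstep : stepA (xs, j, true) m
                = ((xs.set m (xs.getD j 0)).set j (xs.getD m 0), m, false) := by
              unfold stepA; dsimp only; rw [heb]; simp
            have hpar : ∀ i, ((xs.set m (xs.getD j 0)).set j (xs.getD m 0)).getD i 0 % 2
                = xs.getD i 0 % 2 := by
              intro i; rw [hswap]; exact getD_pvSwap_parity xs j m hje he i
            rw [hstep, ih (m+1) _ m false (by simp)]
            have hfilt : (List.range' (m+1) k).filter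
                  (fun i => ((xs.set m (xs.getD j 0)).set j (xs.getD m 0)).getD i 0 % 2 == 0)
                = (List.range' (m+1) k).filter (fun i => xs.getD i 0 % 2 == 0) := by
              apply List.filter_congr
              intro i _; simp only [hpar i]
            rw [hfilt, hswap]
            simp [pairFold]
      · have heb : (xs.getD m 0 % 2 == 0) = false := by simpa using he
        rw [heb]
        simp only [Bool.false_eq_true, if_false]
        have hstep : stepA (xs, j, flip) m = (xs, j, flip) := by
          unfold stepA; dsimp only; rw [heb]; simp
        rw [hstep]
        exact ih (m+1) xs j flip
          (fun hf => ⟨Nat.lt_succ_of_lt (hinv hf).1, (hinv hf).2⟩)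

-- ===== VERDICT (by name: the statement is the Claim_ definition above) =====
theorem solve_spec : Claim_equal_solve := by
  intro nums _
  unfold Spec_solve solve_alt
  rw [solve_eq_stepA, List.range_eq_range']
  rw [loopA_inv nums.length 0 nums 0 false (by simp)]
  simp
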